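-- pv_equiv track=rewrite | github.com/INET-Complexity/macro-main | macromodel/configurations/households_configuration.py | create_household_bundle
-- ===== SOURCE A (Python) =====
-- from typing import Any, Literal, Optional
--
-- def create_household_bundle(n_industries: int, bundles: Optional[list[list[int]]] = None) -> list:
--     """Assign bundle indices to industries based on substitution groups for households.
--
--     For a given number of industries, assign each industry to a bundle index.
--     Industries listed together in a bundle share the same index. Industries not
--     listed in any bundle are assigned unique bundle indices individually.
--
--     After assignment, bundle indices are relabeled to ensure dense, increasing
--     numbering based on first appearance.
--
--     Args:
--         n_industries (int): Total number of industries.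
--         bundles (List[List[int]]): List of substitution bundles, where each
--             bundle is a list of industry indices.
--
--     Returns:
--         list: Array of length n_industries mapping each industry to its bundle index.
--     """
--     if bundles is None:
--         bundles = []
--
--     good_bundle = [-1] * n_industries
--     bundle_idx = 0
--
--     # Assign bundle indices to industries included in bundles
--     for bundle in bundles:
--         for industry in bundle:
--             good_bundle[industry] = bundle_idx
--         bundle_idx += 1
--
--     # Assign remaining industries that are not in any bundle
--     for i in range(n_industries):
--         if good_bundle[i] == -1:
--             good_bundle[i] = bundle_idx
--             bundle_idx += 1
--
--     # Relabel to ensure increasing order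
--     seen = {}
--     new_labels = []
--     for x in good_bundle:
--         if x not in seen:
--             seen[x] = len(seen)
--         new_labels.append(seen[x])
--
--     good_bundle = new_labels
--
--     return good_bundle
-- ===== SOURCE B (Python) =====
-- from typing import Optional
--
--
-- def create_household_bundle(n_industries: int, bundles: Optional[list[list[int]]] = None) -> list:
--     """Position-rank variant: instead of numbering groups with a running counter and
--     then dense-relabelling through a first-seen dict, compute each industry's group
--     START position and return the number of group starts strictly before it."""
--     if bundles is None:
--         bundles = []
--
--     raw = [None] * n_industries
--     for b_idx, bundle in enumerate(bundles):
--         for industry in bundle: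
--             raw[industry] = b_idx
--
--     # first position of each bundle key (first-wins forward scan)
--     firstpos = {}
--     for i, o in enumerate(raw):
--         if o is not None and o not in firstpos:
--             firstpos[o] = i
--
--     # fp[i] = position where industry i's group first appears (itself if solo)
--     fp = [firstpos[o] if o is not None else i for i, o in enumerate(raw)]
--
--     # ranks[p] = number of group starts strictly before position p
--     ranks = []
--     count = 0
--     for i, f in enumerate(fp):
--         ranks.append(count)
--         if f == i:
--             count += 1
--
--     return [ranks[f] for f in fp]
-- ===== Notes on version B (the rewrite author's own statement) =====
-- stated objective: alternative
-- what changed: B never numbers groups with a running counter nor relabels through a first-seen dict: it computes each industry's group START position (first index where its bundle key occurs, or the index itself if unbundled) and returns as label the count of group starts strictly before that position, via a first-position dict, a prefix-count array of starts, and positional lookups.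
import Mathlib
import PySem

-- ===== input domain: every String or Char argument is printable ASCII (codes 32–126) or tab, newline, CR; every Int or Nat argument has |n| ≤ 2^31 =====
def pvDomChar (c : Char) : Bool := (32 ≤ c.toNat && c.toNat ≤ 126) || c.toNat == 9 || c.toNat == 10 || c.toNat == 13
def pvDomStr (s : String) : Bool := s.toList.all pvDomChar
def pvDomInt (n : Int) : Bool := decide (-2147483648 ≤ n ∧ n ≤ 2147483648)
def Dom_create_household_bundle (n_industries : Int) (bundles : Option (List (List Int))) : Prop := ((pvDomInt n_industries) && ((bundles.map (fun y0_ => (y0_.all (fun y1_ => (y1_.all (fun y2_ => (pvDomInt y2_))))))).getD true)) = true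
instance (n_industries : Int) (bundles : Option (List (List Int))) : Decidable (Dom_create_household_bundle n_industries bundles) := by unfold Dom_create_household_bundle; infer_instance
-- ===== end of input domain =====

-- B replaces A's counter-numbering plus first-seen dict relabel by group-START positions:
-- label(i) = number of group starts strictly before the first position of i's group.

-- ===== PORT A =====
-- Python list assignment xs[i] = v (a negative index wraps).  Where the index is out of
-- range Python raises IndexError; those inputs are excluded by Pre_, and there this
-- helper leaves the list unchanged (exact on every input Pre_ admits).
def pySetIdx {α : Type} (xs : List α) (i : Int) (v : α) : List α :=
  let j := if i < 0 then i + xs.length else i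
  if 0 ≤ j ∧ j < (xs.length : Int) then xs.set j.toNat v else xs

-- A's second loop: 'for i in range(n): if g[i] == -1: g[i] = c; c += 1'
-- as the structural recursion over the list it traverses.
def fillA : List Int → Int → List Int
  | [], _ => []
  | x :: xs, c => if x = -1 then c :: fillA xs (c + 1) else x :: fillA xs c

-- A's relabel loop: 'if x not in seen: seen[x] = len(seen); new_labels.append(seen[x])'
def relabelA : List Int → PySem.Dict Int Int → List Int
  | [], _ => []
  | x :: xs, seen =>
    match seen.get? x with
    | some v => v :: relabelA xs seen
    | none => (seen.size : Int) :: relabelA xs (seen.insert x (seen.size : Int))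

def create_household_bundle (n_industries : Int) (bundles : Option (List (List Int))) : List Int :=
  let bs := bundles.getD []
  let st := bs.foldl
    (fun (st : List Int × Int) bundle =>
      (bundle.foldl (fun g ind => pySetIdx g ind st.2) st.1, st.2 + 1))
    (List.replicate n_industries.toNat (-1), 0)
  relabelA (fillA st.1 st.2) PySem.Dict.empty

-- ===== PORT B =====
def create_household_bundle_alt (n_industries : Int) (bundles : Option (List (List Int))) : List Int :=
  let bs := bundles.getD []
  let raw := (bs.foldl
    (fun (st : List (Option Int) × Int) bundle =>
      (bundle.foldl (fun r ind => pySetIdx r ind (some st.2)) st.1, st.2 + 1))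
    (List.replicate n_industries.toNat (none : Option Int), 0)).1
  -- first position of each bundle key (first-wins forward scan)
  let firstpos := (PySem.List.enumerate raw 0).foldl
    (fun (d : PySem.Dict Int Int) (p : Int × Option Int) =>
      match p.2 with
      | some b => if d.contains b then d else d.insert b p.1
      | none => d) PySem.Dict.empty
  -- fp[i] = position where industry i's group first appears (itself if solo);
  -- 'firstpos[o]' never raises KeyError (o was inserted above), so getD's default is unreachable
  let fp := (PySem.List.enumerate raw 0).map
    (fun (p : Int × Option Int) =>
      match p.2 with
      | some b => firstpos.getD b 0
      | none => p.1)
  -- ranks[p] = number of group starts strictly before position p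
  let ranks := ((PySem.List.enumerate fp 0).foldl
    (fun (st : List Int × Int) (p : Int × Int) =>
      (st.1 ++ [st.2], if p.2 = p.1 then st.2 + 1 else st.2)) ([], 0)).1
  -- 'ranks[f]' has 0 ≤ f < len(ranks) always, so pyGetD's default is unreachable
  fp.map (fun f => PySem.List.pyGetD ranks f 0)

-- ===== PRECONDITION & SPEC =====
-- Pre_ excludes exactly the inputs where the Python raises IndexError: some bundle
-- contains an index outside the valid Python range for a list of length n_industries.
def Pre_create_household_bundle (n_industries : Int) (bundles : Option (List (List Int))) : Prop :=
  ∀ bundle ∈ bundles.getD [], ∀ ind ∈ bundle,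
    -(n_industries.toNat : Int) ≤ ind ∧ ind < (n_industries.toNat : Int)
instance (n_industries : Int) (bundles : Option (List (List Int))) : Decidable (Pre_create_household_bundle n_industries bundles) := by unfold Pre_create_household_bundle; infer_instance

def pvWitness_create_household_bundle : Int × Option (List (List Int)) := (4, some [[0, 2], [1]])

def Spec_create_household_bundle (n_industries : Int) (bundles : Option (List (List Int))) (out : List Int) : Prop := out = create_household_bundle_alt n_industries bundles
instance (n_industries : Int) (bundles : Option (List (List Int))) (out : List Int) : Decidable (Spec_create_household_bundle n_industries bundles out) := by unfold Spec_create_household_bundle; infer_instance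

-- ===== CLAIM (what is proved, stated in full; the proofs are below) =====
def Claim_equal_create_household_bundle : Prop := ∀ (n_industries : Int) (bundles : Option (List (List Int))), Dom_create_household_bundle n_industries bundles → Pre_create_household_bundle n_industries bundles → Spec_create_household_bundle n_industries bundles (create_household_bundle n_industries bundles)

-- ===== LEMMAS AND PROOFS =====

-- ---- proof-side characterisations ----

-- first position of industry j's group: where its bundle key first occurs, or j itself
def fpN (raw : List (Option Int)) (j : Nat) : Nat :=
  match raw[j]? with
  | some (some b) => raw.idxOf (some b)
  | _ => j

-- count of entries equal to their (offset) position — 'number of group starts'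
def cf : List Int → Int → Nat
  | [], _ => 0
  | f :: rest, i => (if f = i then 1 else 0) + cf rest (i + 1)

-- the ranks list built by B's third loop, as a recursion
def ranksRec : List Int → Int → Int → List Int
  | [], _, _ => []
  | f :: rest, i, cnt => cnt :: ranksRec rest (i + 1) (if f = i then cnt + 1 else cnt)

-- ---- fill-fold relation between the two ports (A writes ints, B writes options) ----

theorem pySetIdx_map {α β : Type} (g : α → β) (xs : List α) (i : Int) (v : α) :
    pySetIdx (xs.map g) i (g v) = (pySetIdx xs i v).map g := by
  simp only [pySetIdx, List.length_map]
  split <;> split <;> simp [List.map_set]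

theorem mem_pySetIdx {α : Type} {xs : List α} {i : Int} {v y : α}
    (h : y ∈ pySetIdx xs i v) : y = v ∨ y ∈ xs := by
  simp only [pySetIdx] at h
  split at h <;> split at h <;>
    first
      | (rcases List.mem_or_eq_of_mem_set h with h' | h'
         · exact Or.inr h'
         · exact Or.inl h')
      | exact Or.inr h

theorem pySetIdx_getD (raw : List (Option Int)) (ind c : Int) :
    pySetIdx (raw.map (fun o => o.getD (-1))) ind c
      = (pySetIdx raw ind (some c)).map (fun o => o.getD (-1)) :=
  pySetIdx_map (fun o => o.getD (-1)) raw ind (some c)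

theorem inner_rel (bundle : List Int) :
    ∀ (raw : List (Option Int)) (c : Int),
      bundle.foldl (fun g ind => pySetIdx g ind c) (raw.map (fun o => o.getD (-1)))
        = (bundle.foldl (fun r ind => pySetIdx r ind (some c)) raw).map (fun o => o.getD (-1)) := by
  induction bundle with
  | nil => intro raw c; rfl
  | cons ind rest ih =>
    intro raw c
    simp only [List.foldl_cons]
    rw [pySetIdx_getD, ih]

theorem outer_rel (bs : List (List Int)) :
    ∀ (raw : List (Option Int)) (c : Int),
      bs.foldl (fun (st : List Int × Int) bundle =>
          (bundle.foldl (fun g ind => pySetIdx g ind st.2) st.1, st.2 + 1))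
        (raw.map (fun o => o.getD (-1)), c)
      = (((bs.foldl (fun (st : List (Option Int) × Int) bundle =>
            (bundle.foldl (fun r ind => pySetIdx r ind (some st.2)) st.1, st.2 + 1))
          (raw, c)).1).map (fun o => o.getD (-1)),
        (bs.foldl (fun (st : List (Option Int) × Int) bundle =>
            (bundle.foldl (fun r ind => pySetIdx r ind (some st.2)) st.1, st.2 + 1))
          (raw, c)).2) := by
  induction bs with
  | nil => intro raw c; rfl
  | cons bundle rest ih =>
    intro raw c
    simp only [List.foldl_cons]
    rw [inner_rel]
    exact ih _ _

theorem inner_bound (bundle : List Int) :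
    ∀ (raw : List (Option Int)) (c : Int), 0 ≤ c →
      (∀ x : Int, some x ∈ raw → 0 ≤ x ∧ x ≤ c) →
      ∀ x : Int, some x ∈ bundle.foldl (fun r ind => pySetIdx r ind (some c)) raw →
        0 ≤ x ∧ x ≤ c := by
  induction bundle with
  | nil => intro raw c _ h x hx; exact h x hx
  | cons ind rest ih =>
    intro raw c hc h x hx
    refine ih _ _ hc ?_ x hx
    intro y hy
    rcases mem_pySetIdx hy with h' | h'
    · have hyc : y = c := by injection h'
      omega
    · exact h y h'

theorem outer_bound (bs : List (List Int)) :
    ∀ (raw : List (Option Int)) (c : Int), 0 ≤ c →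
      (∀ x : Int, some x ∈ raw → 0 ≤ x ∧ x < c) →
      ∀ x : Int, some x ∈ (bs.foldl (fun (st : List (Option Int) × Int) bundle =>
          (bundle.foldl (fun r ind => pySetIdx r ind (some st.2)) st.1, st.2 + 1))
        (raw, c)).1 →
        0 ≤ x ∧ x < (bs.foldl (fun (st : List (Option Int) × Int) bundle =>
          (bundle.foldl (fun r ind => pySetIdx r ind (some st.2)) st.1, st.2 + 1))
        (raw, c)).2 := by
  induction bs with
  | nil => intro raw c _ h x hx; exact h x hx
  | cons bundle rest ih =>
    intro raw c hc h x hx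
    simp only [List.foldl_cons] at hx ⊢
    refine ih _ _ (by omega) ?_ x hx
    intro y hy
    have := inner_bound bundle raw c hc (fun z hz => ⟨(h z hz).1, le_of_lt (h z hz).2⟩) y hy
    omega

-- ---- facts about fillA ----

theorem fillA_length (l : List Int) : ∀ c, (fillA l c).length = l.length := by
  induction l with
  | nil => intro c; rfl
  | cons x xs ih => intro c; simp only [fillA]; split <;> simp [ih]

theorem fillA_get_of_ne (l : List Int) :
    ∀ (c : Int) (i : Nat) (x : Int), l[i]? = some x → x ≠ -1 → (fillA l c)[i]? = some x := by
  induction l with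
  | nil => intro c i x h _; simp at h
  | cons y ys ih =>
    intro c i x h hx
    cases i with
    | zero =>
      simp only [List.getElem?_cons_zero, Option.some.injEq] at h
      subst h
      simp [fillA, if_neg hx]
    | succ n =>
      simp only [List.getElem?_cons_succ] at h
      simp only [fillA]
      split <;> simpa using ih _ n x h hx

theorem fillA_get_hole (l : List Int) :
    ∀ (c : Int) (i : Nat), l[i]? = some (-1) →
      ∃ v, (fillA l c)[i]? = some v ∧ c ≤ v := by
  induction l with
  | nil => intro c i h; simp at h
  | cons y ys ih =>
    intro c i h
    cases i with
    | zero =>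
      simp only [List.getElem?_cons_zero, Option.some.injEq] at h
      subst h
      exact ⟨c, by simp [fillA], le_refl c⟩
    | succ n =>
      simp only [List.getElem?_cons_succ] at h
      simp only [fillA]
      by_cases hy : y = -1
      · obtain ⟨v, hv, hcv⟩ := ih (c + 1) n h
        exact ⟨v, by simpa [hy] using hv, by omega⟩
      · obtain ⟨v, hv, hcv⟩ := ih c n h
        exact ⟨v, by simpa [hy] using hv, hcv⟩

theorem fillA_idxOf (l : List Int) :
    ∀ (c x : Int), x ≠ -1 → x ∈ l → (∀ y ∈ l, y ≠ -1 → y < c) →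
      (fillA l c).idxOf x = l.idxOf x := by
  induction l with
  | nil => intro c x _ hm _; simp at hm
  | cons y ys ih =>
    intro c x hx hm hbd
    by_cases hy : y = -1
    · subst hy
      have hmys : x ∈ ys := by
        rcases List.mem_cons.mp hm with h | h
        · exact absurd h hx
        · exact h
      have hxc : x < c := hbd x hm hx
      have hfill : fillA (-1 :: ys) c = c :: fillA ys (c + 1) := by simp [fillA]
      rw [hfill, List.idxOf_cons, List.idxOf_cons,
        show ((c == x) = false) from beq_false_of_ne (by omega),
        show (((-1 : Int) == x) = false) from beq_false_of_ne (Ne.symm hx)]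
      simp only [cond_false]
      rw [ih (c + 1) x hx hmys (fun z hz hz1 => by have := hbd z (List.mem_cons_of_mem _ hz) hz1; omega)]
    · simp only [fillA, if_neg hy, List.idxOf_cons]
      by_cases hxy : y = x
      · simp [hxy]
      · have hmys : x ∈ ys := by
          rcases List.mem_cons.mp hm with h | h
          · exact absurd h.symm hxy
          · exact h
        simp only [show ((y == x) = false) from beq_false_of_ne hxy, cond_false]
        rw [ih c x hx hmys (fun z hz hz1 => hbd z (List.mem_cons_of_mem _ hz) hz1)]

theorem fillA_idxOf_hole (l : List Int) :
    ∀ (c : Int) (i : Nat) (v : Int), l[i]? = some (-1) →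
      (∀ y ∈ l, y ≠ -1 → y < c) → (fillA l c)[i]? = some v →
      (fillA l c).idxOf v = i := by
  induction l with
  | nil => intro c i v h _ _; simp at h
  | cons y ys ih =>
    intro c i v h hbd hv
    cases i with
    | zero =>
      simp only [List.getElem?_cons_zero, Option.some.injEq] at h
      subst h
      have hfill : fillA (-1 :: ys) c = c :: fillA ys (c + 1) := by simp [fillA]
      rw [hfill] at hv
      simp only [List.getElem?_cons_zero, Option.some.injEq] at hv
      rw [hfill, List.idxOf_cons, show ((c == v) = true) by simp [hv], cond_true]
    | succ n =>
      simp only [List.getElem?_cons_succ] at h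
      by_cases hy : y = -1
      · subst hy
        have hfill : fillA (-1 :: ys) c = c :: fillA ys (c + 1) := by simp [fillA]
        rw [hfill] at hv ⊢
        simp only [List.getElem?_cons_succ] at hv
        have hbd' : ∀ z ∈ ys, z ≠ -1 → z < c + 1 := fun z hz hz1 => by
          have := hbd z (List.mem_cons_of_mem _ hz) hz1; omega
        obtain ⟨v', hv', hcv'⟩ := fillA_get_hole ys (c + 1) n h
        have hvv : v' = v := by rw [hv'] at hv; injection hv
        subst hvv
        rw [List.idxOf_cons, show ((c == v') = false) from beq_false_of_ne (by omega), cond_false,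
          ih (c + 1) n v' h hbd' hv']
      · have hfill : fillA (y :: ys) c = y :: fillA ys c := by simp [fillA, hy]
        rw [hfill] at hv ⊢
        simp only [List.getElem?_cons_succ] at hv
        have hbd' : ∀ z ∈ ys, z ≠ -1 → z < c := fun z hz hz1 =>
          hbd z (List.mem_cons_of_mem _ hz) hz1
        obtain ⟨v', hv', hcv'⟩ := fillA_get_hole ys c n h
        have hvv : v' = v := by rw [hv'] at hv; injection hv
        subst hvv
        have hyc : y < c := hbd y List.mem_cons_self hy
        rw [List.idxOf_cons, show ((y == v') = false) from beq_false_of_ne (by omega), cond_false,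
          ih c n v' h hbd' hv']

-- ---- relabelA computes 'distinct count of prefix before first occurrence' ----

theorem relabelA_gen (ys : List Int) :
    ∀ (P : List Int) (seen : PySem.Dict Int Int),
      (∀ x : Int, seen.get? x =
        if x ∈ P then some (((P.take (P.idxOf x)).toFinset.card : Int)) else none) →
      seen.size = P.toFinset.card →
      relabelA ys seen
        = ys.map (fun y => ((((P ++ ys).take ((P ++ ys).idxOf y)).toFinset.card : Int))) := by
  induction ys with
  | nil => intro P seen _ _; rfl
  | cons y ys ih =>
    intro P seen hget hsize
    have hfin : ∀ (Q : List Int) (z : Int), (Q ++ [z]).toFinset = insert z Q.toFinset := by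
      intro Q z; simp [List.toFinset_append]
    by_cases hmem : y ∈ P
    · have hgy : seen.get? y = some ((P.take (P.idxOf y)).toFinset.card : Int) := by
        rw [hget y, if_pos hmem]
      have hidx : (P ++ y :: ys).idxOf y = P.idxOf y := List.idxOf_append_of_mem hmem
      have hlt : P.idxOf y < P.length := List.idxOf_lt_length_of_mem hmem
      have htake : (P ++ y :: ys).take (P.idxOf y) = P.take (P.idxOf y) :=
        List.take_append_of_le_length (le_of_lt hlt)
      simp only [relabelA, hgy, List.map_cons, hidx, htake]
      congr 1
      · have hPP : P ++ y :: ys = (P ++ [y]) ++ ys := by simp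
        rw [hPP]
        refine ih (P ++ [y]) seen ?_ ?_
        · intro x
          by_cases hxP : x ∈ P
          · have hxP' : x ∈ P ++ [y] := List.mem_append_left _ hxP
            rw [if_pos hxP', hget x, if_pos hxP,
              List.idxOf_append, if_pos hxP,
              List.take_append_of_le_length (le_of_lt (List.idxOf_lt_length_of_mem hxP))]
          · have hxy : x ≠ y := fun hc => hxP (hc ▸ hmem)
            have hxP' : x ∉ P ++ [y] := by
              intro hc
              rcases List.mem_append.mp hc with hc | hc
              · exact hxP hc
              · exact hxy (by simpa using hc)
            rw [if_neg hxP', hget x, if_neg hxP]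
        · rw [hsize, hfin, Finset.insert_eq_self.mpr (List.mem_toFinset.mpr hmem)]
    · have hgy : seen.get? y = none := by rw [hget y, if_neg hmem]
      have hidx : (P ++ y :: ys).idxOf y = P.length := by
        rw [List.idxOf_append, if_neg hmem, List.idxOf_cons]
        simp
      have htake : (P ++ y :: ys).take P.length = P := List.take_left
      have hcont : seen.contains y = false := (PySem.Dict.get?_eq_none_iff_contains seen y).mp hgy
      simp only [relabelA, hgy, List.map_cons, hidx, htake]
      congr 1
      · exact congrArg _ hsize
      · have hPP : P ++ y :: ys = (P ++ [y]) ++ ys := by simp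
        rw [hPP]
        refine ih (P ++ [y]) (seen.insert y (seen.size : Int)) ?_ ?_
        · intro x
          by_cases hxy : x = y
          · subst hxy
            rw [PySem.Dict.get?_insert_self,
              if_pos (List.mem_append_right _ (List.mem_singleton_self x)),
              List.idxOf_append, if_neg hmem, List.idxOf_cons]
            simp only [BEq.rfl, cond_true, Nat.zero_add]
            rw [List.take_left, hsize]
          · rw [PySem.Dict.get?_insert_of_ne _ _ hxy, hget x]
            by_cases hxP : x ∈ P
            · have hxP' : x ∈ P ++ [y] := List.mem_append_left _ hxP
              rw [if_pos hxP, if_pos hxP', List.idxOf_append, if_pos hxP,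
                List.take_append_of_le_length (le_of_lt (List.idxOf_lt_length_of_mem hxP))]
            · have hxP' : x ∉ P ++ [y] := by
                intro hc
                rcases List.mem_append.mp hc with hc | hc
                · exact hxP hc
                · exact hxy (by simpa using hc)
              rw [if_neg hxP, if_neg hxP']
        · rw [PySem.Dict.size_insert, hcont, hfin,
            Finset.card_insert_of_notMem (by simpa using hmem)]
          simp [hsize]

theorem relabelA_eq (g : List Int) :
    relabelA g PySem.Dict.empty
      = g.map (fun y => (((g.take (g.idxOf y)).toFinset.card : Int))) := by
  have h := relabelA_gen g [] PySem.Dict.empty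
    (fun x => by simp [PySem.Dict.get?_empty]) (by simp [PySem.Dict.size_empty])
  simpa using h

-- ---- prefix distinct count = count of first positions ----

theorem idxOf_getElem_le (l : List Int) : ∀ (j : Nat) (h : j < l.length), l.idxOf l[j] ≤ j := by
  induction l with
  | nil => intro j h; simp at h
  | cons y ys ih =>
    intro j h
    cases j with
    | zero => simp
    | succ n =>
      have hn : n < ys.length := by simpa using h
      simp only [List.getElem_cons_succ, List.idxOf_cons]
      cases hyx : (y == ys[n]'hn) with
      | true => simp
      | false =>
        simp only [cond_false]
        have := ih n hn
        omega

theorem idxOf_self_iff (l : List Int) (j : Nat) (h : j < l.length) :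
    l.idxOf l[j] = j ↔ l[j] ∉ l.take j := by
  constructor
  · intro heq hmem
    obtain ⟨k, hk, hkv⟩ := List.mem_take_iff_getElem.mp hmem
    have hkj : k < j := lt_of_lt_of_le hk (min_le_left _ _)
    have := idxOf_getElem_le l k (lt_of_lt_of_le hk (min_le_right _ _))
    rw [hkv] at this
    omega
  · intro hmem
    have hle : l.idxOf l[j] ≤ j := idxOf_getElem_le l j h
    rcases Nat.lt_or_ge (l.idxOf l[j]) j with hlt | hge
    · exfalso
      apply hmem
      refine List.mem_take_iff_getElem.mpr ⟨l.idxOf l[j], by omega, ?_⟩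
      exact List.getElem_idxOf (by omega)
    · omega

theorem card_take_eq_countP (g : List Int) :
    ∀ (p : Nat), p ≤ g.length →
      (g.take p).toFinset.card
        = (List.range p).countP (fun j => decide (g.idxOf (g.getD j 0) = j)) := by
  intro p
  induction p with
  | zero => intro _; simp
  | succ q ih =>
    intro hq
    have hqlen : q < g.length := by omega
    rw [List.take_add_one, List.range_succ, List.countP_append,
      List.getElem?_eq_getElem hqlen]
    simp only [Option.toList_some]
    rw [← ih (by omega)]
    have hfin : (g.take q ++ [g[q]]).toFinset = insert g[q] (g.take q).toFinset := by
      simp only [List.toFinset_append, List.toFinset_cons, List.toFinset_nil,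
        Finset.union_insert, Finset.union_empty]
    rw [hfin]
    have hpred : List.countP (fun j => decide (g.idxOf (g.getD j 0) = j)) [q]
        = if g[q] ∈ g.take q then 0 else 1 := by
      simp only [List.countP_cons, List.countP_nil, List.getD_eq_getElem g 0 hqlen]
      by_cases hmem : g[q] ∈ g.take q
      · have hne : ¬ (g.idxOf g[q] = q) := by
          rw [idxOf_self_iff g q hqlen]; simpa using hmem
        simp [hne, hmem]
      · have heq : g.idxOf g[q] = q := (idxOf_self_iff g q hqlen).mpr hmem
        simp [heq, hmem]
    rw [hpred]
    by_cases hmem : g[q] ∈ g.take q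
    · rw [Finset.insert_eq_self.mpr (List.mem_toFinset.mpr hmem)]
      simp [hmem]
    · rw [Finset.card_insert_of_notMem (by simpa using hmem)]
      simp [hmem]

-- ---- B's pieces ----

theorem firstpos_get (raw : List (Option Int)) :
    ∀ (s : Int) (d : PySem.Dict Int Int) (b : Int),
      ((PySem.List.enumerate raw s).foldl
        (fun (d : PySem.Dict Int Int) (p : Int × Option Int) =>
          match p.2 with
          | some b => if d.contains b then d else d.insert b p.1
          | none => d) d).get? b
      = if d.contains b then d.get? b
        else (raw.idxOf? (some b)).map (fun j => s + (j : Int)) := by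
  induction raw with
  | nil =>
    intro s d b
    simp only [PySem.List.enumerate_nil, List.foldl_nil, List.idxOf?_nil]
    by_cases hc : d.contains b = true
    · simp [hc]
    · simp only [Bool.not_eq_true] at hc
      simp [hc, (PySem.Dict.get?_eq_none_iff_contains d b).mpr hc]
  | cons o rest ih =>
    intro s d b
    rw [PySem.List.enumerate_cons]
    simp only [List.foldl_cons]
    cases o with
    | none =>
      rw [ih]
      by_cases hc : d.contains b = true
      · simp [hc]
      · simp only [Bool.not_eq_true] at hc
        simp only [hc, Bool.false_eq_true, if_false]
        have : (List.idxOf? (some b) (none :: rest)) = (List.idxOf? (some b) rest).map (· + 1) := by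
          simp [List.idxOf?_cons]
        rw [this]
        cases List.idxOf? (some b) rest <;> simp <;> omega
    | some b' =>
      by_cases hb : b' = b
      · subst hb
        by_cases hc : d.contains b' = true
        · simp only [hc, if_true, ih]
        · simp only [Bool.not_eq_true] at hc
          simp only [hc, Bool.false_eq_true, if_false, ih]
          rw [if_pos (PySem.Dict.contains_insert_self d b' s)]
          rw [PySem.Dict.get?_insert_self]
          have : (List.idxOf? (some b') (some b' :: rest)) = some 0 := by
            simp [List.idxOf?_cons]
          rw [this]
          simp
      · have hgoal : ∀ (d' : PySem.Dict Int Int),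
            d'.contains b = d.contains b → d'.get? b = d.get? b →
            ((PySem.List.enumerate rest (s + 1)).foldl
              (fun (d : PySem.Dict Int Int) (p : Int × Option Int) =>
                match p.2 with
                | some b => if d.contains b then d else d.insert b p.1
                | none => d) d').get? b
            = if d.contains b then d.get? b
              else (List.idxOf? (some b) (some b' :: rest)).map (fun j => s + (j : Int)) := by
          intro d' hcont hget
          rw [ih, hcont, hget]
          have : (List.idxOf? (some b) (some b' :: rest)) = (List.idxOf? (some b) rest).map (· + 1) := by
            simp [List.idxOf?_cons, hb]
          rw [this]
          by_cases hc : d.contains b = true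
          · simp [hc]
          · simp only [Bool.not_eq_true] at hc
            simp only [hc, Bool.false_eq_true, if_false]
            cases List.idxOf? (some b) rest <;> simp <;> omega
        by_cases hc' : d.contains b' = true
        · simp only [hc', if_true]
          exact hgoal d rfl rfl
        · simp only [Bool.not_eq_true] at hc'
          simp only [hc', Bool.false_eq_true, if_false]
          refine hgoal (d.insert b' s) ?_ ?_
          · rw [PySem.Dict.contains_insert]
            simp [show (b == b') = false from beq_false_of_ne (Ne.symm hb)]
          · exact PySem.Dict.get?_insert_of_ne d s (Ne.symm hb)

theorem ranks_fold (l : List Int) :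
    ∀ (s : Int) (acc : List Int) (cnt : Int),
      ((PySem.List.enumerate l s).foldl
        (fun (st : List Int × Int) (p : Int × Int) =>
          (st.1 ++ [st.2], if p.2 = p.1 then st.2 + 1 else st.2)) (acc, cnt)).1
      = acc ++ ranksRec l s cnt := by
  induction l with
  | nil => intro s acc cnt; simp [PySem.List.enumerate_nil, ranksRec]
  | cons f rest ih =>
    intro s acc cnt
    rw [PySem.List.enumerate_cons]
    simp only [List.foldl_cons, ranksRec]
    rw [ih]
    simp

theorem ranksRec_get (l : List Int) :
    ∀ (s cnt : Int) (p : Nat), p < l.length →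
      (ranksRec l s cnt)[p]? = some (cnt + (cf (l.take p) s : Int)) := by
  induction l with
  | nil => intro s cnt p h; simp at h
  | cons f rest ih =>
    intro s cnt p h
    cases p with
    | zero => simp [ranksRec, cf]
    | succ n =>
      simp only [ranksRec, List.getElem?_cons_succ]
      rw [ih (s + 1) _ n (by simpa using h), List.take_succ_cons]
      simp only [cf]
      split_ifs <;> simp only [Option.some.injEq] <;> push_cast <;> ring

theorem cf_map_range' (F : Nat → Int) :
    ∀ (b a : Nat), cf ((List.range' a b).map F) (a : Int)
      = ((List.range' a b).countP (fun j => decide (F j = (j : Int)))) := by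
  intro b
  induction b with
  | zero => intro a; simp [cf]
  | succ m ih =>
    intro a
    rw [List.range'_succ]
    simp only [List.map_cons, cf, List.countP_cons]
    rw [show ((a : Int) + 1) = ((a + 1 : Nat) : Int) by push_cast; ring, ih (a + 1)]
    by_cases hfa : F a = (a : Int) <;> simp [hfa, Nat.add_comm]


-- ---- bridging the two sides ----

theorem idxOf?_of_mem (l : List (Option Int)) (x : Option Int) (h : x ∈ l) :
    l.idxOf? x = some (l.idxOf x) := by
  induction l with
  | nil => simp at h
  | cons y ys ih =>
    rw [List.idxOf?_cons, List.idxOf_cons]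
    by_cases hxy : y == x
    · simp [hxy]
    · simp only [Bool.not_eq_true] at hxy
      rw [hxy]
      simp only [cond_false, Bool.false_eq_true, if_false]
      have hm : x ∈ ys := by
        rcases List.mem_cons.mp h with h | h
        · subst h; simp at hxy
        · exact h
      rw [ih hm]
      rfl

theorem idxOf_map_getD (raw : List (Option Int)) (b : Int) (hb : b ≠ -1) :
    (raw.map (fun o => o.getD (-1))).idxOf b = raw.idxOf (some b) := by
  induction raw with
  | nil => rfl
  | cons o rest ih =>
    simp only [List.map_cons, List.idxOf_cons]
    have hcond : ((o.getD (-1) == b) = (o == some b)) := by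
      cases o with
      | none => simp [Ne.symm hb]
      | some x => simp
    rw [hcond, ih]

theorem g_idxOf (raw : List (Option Int)) (c : Int)
    (hbd : ∀ x : Int, some x ∈ raw → 0 ≤ x ∧ x < c) (j : Nat) (hj : j < raw.length)
    (v : Int) (hv : (fillA (raw.map (fun o => o.getD (-1))) c)[j]? = some v) :
    (fillA (raw.map (fun o => o.getD (-1))) c).idxOf v = fpN raw j := by
  have hbd' : ∀ y ∈ raw.map (fun o => o.getD (-1)), y ≠ -1 → y < c := by
    intro y hy hy1
    rcases List.mem_map.mp hy with ⟨o, ho, rfl⟩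
    cases o with
    | none => simp at hy1
    | some x => exact (hbd x ho).2
  have hoj : raw[j]? = some raw[j] := List.getElem?_eq_getElem hj
  cases ho : raw[j] with
  | none =>
    have hklj : (raw.map (fun o => o.getD (-1)))[j]? = some (-1) := by
      rw [List.getElem?_map, hoj, ho]
      rfl
    rw [fillA_idxOf_hole _ c j v hklj hbd' hv]
    simp [fpN, hoj, ho]
  | some b =>
    have hmemb : some b ∈ raw := by
      rw [← ho]; exact List.getElem_mem hj
    have hb0 : 0 ≤ b := (hbd b hmemb).1
    have hbne : b ≠ -1 := by omega
    have hklj : (raw.map (fun o => o.getD (-1)))[j]? = some b := by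
      rw [List.getElem?_map, hoj, ho]
      rfl
    have hgv : (fillA (raw.map (fun o => o.getD (-1))) c)[j]? = some b :=
      fillA_get_of_ne _ c j b hklj hbne
    have hvb : v = b := by
      rw [hgv] at hv
      injection hv with h
      exact h.symm
    subst hvb
    rw [fillA_idxOf _ c v hbne (by simpa using List.mem_map_of_mem (f := fun o => o.getD (-1)) hmemb) hbd',
      idxOf_map_getD raw v hbne]
    simp [fpN, hoj, ho]

theorem fpN_lt (raw : List (Option Int)) (i : Nat) (hi : i < raw.length) :
    fpN raw i < raw.length := by
  have hoi : raw[i]? = some raw[i] := List.getElem?_eq_getElem hi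
  cases ho : raw[i] with
  | none => simpa [fpN, hoi, ho] using hi
  | some b =>
    have hmemb : some b ∈ raw := by rw [← ho]; exact List.getElem_mem hi
    simpa [fpN, hoi, ho] using List.idxOf_lt_length_of_mem hmemb

-- the common closed form both sides reach:
-- label j = number of group starts strictly before j's group start
theorem A_side (raw : List (Option Int)) (c : Int)
    (hbd : ∀ x : Int, some x ∈ raw → 0 ≤ x ∧ x < c) :
    relabelA (fillA (raw.map (fun o => o.getD (-1))) c) PySem.Dict.empty
      = (List.range raw.length).map (fun j =>
          (((List.range (fpN raw j)).countP (fun k => decide (fpN raw k = k)) : Nat) : Int)) := by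
  have hglen : (fillA (raw.map (fun o => o.getD (-1))) c).length = raw.length := by
    rw [fillA_length, List.length_map]
  rw [relabelA_eq]
  apply List.ext_getElem?
  intro i
  by_cases hi : i < raw.length
  · have hig : i < (fillA (raw.map (fun o => o.getD (-1))) c).length := by omega
    rw [List.getElem?_map, List.getElem?_map,
      List.getElem?_eq_getElem hig,
      List.getElem?_eq_getElem (show i < (List.range raw.length).length by simpa using hi)]
    simp only [Option.map_some, List.getElem_range, Option.some.injEq]
    have hidx : (fillA (raw.map (fun o => o.getD (-1))) c).idxOf
        ((fillA (raw.map (fun o => o.getD (-1))) c)[i]) = fpN raw i :=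
      g_idxOf raw c hbd i hi _ (List.getElem?_eq_getElem hig)
    rw [hidx, card_take_eq_countP _ (fpN raw i) (by rw [hglen]; exact le_of_lt (fpN_lt raw i hi))]
    congr 1
    apply List.countP_congr
    intro j hj
    have hjp : j < fpN raw i := List.mem_range.mp hj
    have hjn : j < raw.length := lt_trans hjp (fpN_lt raw i hi)
    have hjg : j < (fillA (raw.map (fun o => o.getD (-1))) c).length := by omega
    rw [List.getD_eq_getElem _ 0 hjg,
      g_idxOf raw c hbd j hjn _ (List.getElem?_eq_getElem hjg)]
  · rw [List.getElem?_eq_none (by rw [List.length_map, hglen]; omega),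
      List.getElem?_eq_none (by simp; omega)]

theorem B_side (raw : List (Option Int)) :
    ((PySem.List.enumerate raw 0).map
        (fun (p : Int × Option Int) =>
          match p.2 with
          | some b => ((PySem.List.enumerate raw 0).foldl
              (fun (d : PySem.Dict Int Int) (p : Int × Option Int) =>
                match p.2 with
                | some b => if d.contains b then d else d.insert b p.1
                | none => d) PySem.Dict.empty).getD b 0
          | none => p.1)).map
      (fun f => PySem.List.pyGetD
        (((PySem.List.enumerate ((PySem.List.enumerate raw 0).map
            (fun (p : Int × Option Int) =>
              match p.2 with
              | some b => ((PySem.List.enumerate raw 0).foldl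
                  (fun (d : PySem.Dict Int Int) (p : Int × Option Int) =>
                    match p.2 with
                    | some b => if d.contains b then d else d.insert b p.1
                    | none => d) PySem.Dict.empty).getD b 0
              | none => p.1)) 0).foldl
          (fun (st : List Int × Int) (p : Int × Int) =>
            (st.1 ++ [st.2], if p.2 = p.1 then st.2 + 1 else st.2)) ([], 0)).1) f 0)
      = (List.range raw.length).map (fun j =>
          (((List.range (fpN raw j)).countP (fun k => decide (fpN raw k = k)) : Nat) : Int)) := by
  have hfp : (PySem.List.enumerate raw 0).map
        (fun (p : Int × Option Int) =>
          match p.2 with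
          | some b => ((PySem.List.enumerate raw 0).foldl
              (fun (d : PySem.Dict Int Int) (p : Int × Option Int) =>
                match p.2 with
                | some b => if d.contains b then d else d.insert b p.1
                | none => d) PySem.Dict.empty).getD b 0
          | none => p.1)
      = (List.range raw.length).map (fun j => ((fpN raw j : Nat) : Int)) := by
    apply List.ext_getElem?
    intro i
    by_cases hi : i < raw.length
    · rw [List.getElem?_map, List.getElem?_map, PySem.List.getElem?_enumerate,
        List.getElem?_eq_getElem hi,
        List.getElem?_eq_getElem (show i < (List.range raw.length).length by simpa using hi)]
      simp only [Option.map_some, List.getElem_range, Option.some.injEq]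
      cases ho : raw[i] with
      | none => simp [fpN, List.getElem?_eq_getElem hi, ho]
      | some b =>
        have hmemb : some b ∈ raw := by rw [← ho]; exact List.getElem_mem hi
        simp only []
        rw [PySem.Dict.getD_eq_get?_getD, firstpos_get raw 0 PySem.Dict.empty b,
          PySem.Dict.contains_empty]
        simp only [Bool.false_eq_true, if_false]
        rw [idxOf?_of_mem raw (some b) hmemb]
        simp [fpN, List.getElem?_eq_getElem hi, ho]
    · rw [List.getElem?_eq_none (by simp; omega), List.getElem?_eq_none (by simp; omega)]
  rw [hfp, ranks_fold]
  apply List.ext_getElem?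
  intro i
  by_cases hi : i < raw.length
  · rw [List.getElem?_map, List.getElem?_map,
      List.getElem?_eq_getElem (show i < (List.range raw.length).length by simpa using hi)]
    simp only [Option.map_some, List.getElem_range, List.nil_append]
    have hp : fpN raw i < raw.length := fpN_lt raw i hi
    rw [PySem.List.pyGetD_natCast, List.getD_eq_getElem?_getD,
      ranksRec_get _ 0 0 (fpN raw i)
        (by rw [List.length_map, List.length_range]; exact hp)]
    simp only [Option.getD_some]
    have htake : ((List.range raw.length).map (fun j => ((fpN raw j : Nat) : Int))).take (fpN raw i)
        = (List.range' 0 (fpN raw i)).map (fun j => ((fpN raw j : Nat) : Int)) := by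
      rw [← List.map_take, List.take_range, Nat.min_eq_left (le_of_lt hp), List.range_eq_range']
    have hcf := cf_map_range' (fun j => ((fpN raw j : Nat) : Int)) (fpN raw i) 0
    simp only [Nat.cast_zero] at hcf
    rw [htake, hcf, ← List.range_eq_range']
    rw [List.getElem?_map, List.getElem?_eq_getElem (show i < (List.range raw.length).length by simpa using hi)]
    simp only [Option.map_some, List.getElem_range, Option.some.injEq]
    rw [show (List.range (fpN raw i)).countP (fun j => decide (((fpN raw j : Nat) : Int) = (j : Int)))
        = (List.range (fpN raw i)).countP (fun k => decide (fpN raw k = k))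
      from List.countP_congr (fun k _ => by simp)]
    simp
  · rw [List.getElem?_eq_none (by simp; omega), List.getElem?_eq_none (by simp; omega)]

-- ===== VERDICT (by name: the statement is the Claim_ definition above) =====
theorem create_household_bundle_spec : Claim_equal_create_household_bundle := by
  intro n bundles _ _
  unfold Spec_create_household_bundle
  simp only [create_household_bundle, create_household_bundle_alt]
  have hinit : (List.replicate n.toNat (-1 : Int))
      = (List.replicate n.toNat (none : Option Int)).map (fun o => o.getD (-1)) := by
    simp
  rw [hinit, outer_rel]
  have hbd := outer_bound (bundles.getD []) (List.replicate n.toNat (none : Option Int)) 0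
    (le_refl 0) (fun x hx => absurd (List.eq_of_mem_replicate hx) (by simp))
  exact (A_side _ _ hbd).trans (B_side _).symm
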